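-- pv_equiv track=rewrite | github.com/kamiwaza-outcome/outcome_Mercury | backend/services/document_refiner.py | _classify_improvement
-- ===== SOURCE A (Python) =====
-- def _classify_improvement(question: str) -> str:
--     """Classify the type of improvement based on question"""
--
--     question_lower = question.lower()
--
--     if any(word in question_lower for word in ['specific', 'detail', 'example']):
--         return 'add_specifics'
--     elif any(word in question_lower for word in ['verify', 'accurate', 'correct']):
--         return 'verify_accuracy'
--     elif any(word in question_lower for word in ['missing', 'add', 'include']):
--         return 'add_missing_info'
--     elif any(word in question_lower for word in ['clarify', 'explain', 'elaborate']):
--         return 'clarify'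
--     elif any(word in question_lower for word in ['evidence', 'proof', 'support']):
--         return 'add_evidence'
--     else:
--         return 'general_improvement'
-- ===== SOURCE B (Python) =====
-- KEYWORDS = {
--     'specific': 0, 'detail': 0, 'example': 0,
--     'verify': 1, 'accurate': 1, 'correct': 1,
--     'missing': 2, 'add': 2, 'include': 2,
--     'clarify': 3, 'explain': 3, 'elaborate': 3,
--     'evidence': 4, 'proof': 4, 'support': 4,
-- }
--
-- LABELS = ['add_specifics', 'verify_accuracy', 'add_missing_info',
--           'clarify', 'add_evidence', 'general_improvement']
--
--
-- def _classify_improvement(question: str) -> str: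
--     """Single left-to-right scan: at each position of the lowercased question,
--     check which keywords start there and keep the best (lowest) priority seen."""
--     q = question.lower()
--     best = len(LABELS) - 1
--     while q:
--         for word, priority in KEYWORDS.items():
--             if priority < best and q.startswith(word):
--                 best = priority
--         q = q[1:]
--     return LABELS[best]
-- ===== Notes on version B (the rewrite author's own statement) =====
-- stated objective: alternative
-- what changed: Replaces the keyword-driven if/elif cascade of substring tests with a position-driven scanner: one left-to-right pass over the lowercased question that, at each position, checks which keywords start there and keeps the minimum priority, indexing a label table at the end (slower on long strings due to suffix slicing).
import Mathlib
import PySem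

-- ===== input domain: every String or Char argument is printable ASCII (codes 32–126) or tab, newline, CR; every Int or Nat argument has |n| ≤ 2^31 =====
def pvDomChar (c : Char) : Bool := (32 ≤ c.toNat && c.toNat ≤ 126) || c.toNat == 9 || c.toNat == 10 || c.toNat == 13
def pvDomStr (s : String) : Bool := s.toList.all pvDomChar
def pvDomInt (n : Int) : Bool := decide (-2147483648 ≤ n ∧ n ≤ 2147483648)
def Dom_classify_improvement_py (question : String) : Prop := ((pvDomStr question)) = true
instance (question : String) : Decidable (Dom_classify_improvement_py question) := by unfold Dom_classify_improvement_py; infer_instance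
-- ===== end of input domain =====

-- B replaces A's keyword-driven if/elif cascade of `in` tests with a position-driven left-to-right
-- scanner that tracks the minimum priority of any keyword starting at each position (alternative, same cost).


-- ===== PORT A =====
def classify_improvement_py (question : String) : String :=
  let question_lower := PySem.Str.lower question
  if ["specific", "detail", "example"].any (fun word => PySem.Str.isIn word question_lower) then
    "add_specifics"
  else if ["verify", "accurate", "correct"].any (fun word => PySem.Str.isIn word question_lower) then
    "verify_accuracy"
  else if ["missing", "add", "include"].any (fun word => PySem.Str.isIn word question_lower) then
    "add_missing_info"
  else if ["clarify", "explain", "elaborate"].any (fun word => PySem.Str.isIn word question_lower) then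
    "clarify"
  else if ["evidence", "proof", "support"].any (fun word => PySem.Str.isIn word question_lower) then
    "add_evidence"
  else
    "general_improvement"

-- ===== PORT B =====
-- KEYWORDS dict as an association list (insertion order)
def pvKeywords : List (String × Nat) :=
  [("specific", 0), ("detail", 0), ("example", 0),
   ("verify", 1), ("accurate", 1), ("correct", 1),
   ("missing", 2), ("add", 2), ("include", 2),
   ("clarify", 3), ("explain", 3), ("elaborate", 3),
   ("evidence", 4), ("proof", 4), ("support", 4)]

def pvLabels : List String :=
  ["add_specifics", "verify_accuracy", "add_missing_info",
   "clarify", "add_evidence", "general_improvement"]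

-- the `while q:` loop of Source B: the string shrinks by one char per iteration (q = q[1:]);
-- `q.startswith(word)` is PySem.Chars.startswith on the current suffix (exact on ASCII)
def pvScan : List Char → Nat → Nat
  | [], best => best
  | c :: rest, best =>
      pvScan rest (pvKeywords.foldl
        (fun b wp => if wp.2 < b ∧ PySem.Chars.startswith (c :: rest) wp.1.toList = true then wp.2 else b)
        best)

def classify_improvement_py_alt (question : String) : String :=
  let q := (PySem.Str.lower question).toList
  pvLabels.getD (pvScan q (pvLabels.length - 1)) "general_improvement"

-- ===== PRECONDITION & SPEC =====
def Spec_classify_improvement_py (question : String) (out : String) : Prop := out = classify_improvement_py_alt question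
instance (question : String) (out : String) : Decidable (Spec_classify_improvement_py question out) := by unfold Spec_classify_improvement_py; infer_instance

-- ===== CLAIM (what is proved, stated in full; the proofs are below) =====
def Claim_equal_classify_improvement_py : Prop := ∀ (question : String), Dom_classify_improvement_py question → Spec_classify_improvement_py question (classify_improvement_py question)

-- ===== LEMMAS AND PROOFS =====

-- proof-side vocabulary
def pvStepf (q : List Char) : Nat → (String × Nat) → Nat :=
  fun b wp => if wp.2 < b ∧ PySem.Chars.startswith q wp.1.toList = true then wp.2 else b

def pvg0 : List String := ["specific", "detail", "example"]
def pvg1 : List String := ["verify", "accurate", "correct"]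
def pvg2 : List String := ["missing", "add", "include"]
def pvg3 : List String := ["clarify", "explain", "elaborate"]
def pvg4 : List String := ["evidence", "proof", "support"]

def pvPf (ws : List String) (q : List Char) : Bool :=
  ws.any (fun w => PySem.Chars.startswith q w.toList)
def pvOcc (ws : List String) (q : List Char) : Bool :=
  ws.any (fun w => PySem.Chars.isIn w.toList q)

def pvGp (q : List Char) : Nat :=
  if pvPf pvg0 q then 0 else if pvPf pvg1 q then 1 else if pvPf pvg2 q then 2
  else if pvPf pvg3 q then 3 else if pvPf pvg4 q then 4 else 5

def pvF (q : List Char) : Nat :=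
  if pvOcc pvg0 q then 0 else if pvOcc pvg1 q then 1 else if pvOcc pvg2 q then 2
  else if pvOcc pvg3 q then 3 else if pvOcc pvg4 q then 4 else 5

theorem pvKeywords_split :
    pvKeywords = (pvg0.map (fun w => (w, 0))) ++ (pvg1.map (fun w => (w, 1)))
      ++ (pvg2.map (fun w => (w, 2))) ++ (pvg3.map (fun w => (w, 3)))
      ++ (pvg4.map (fun w => (w, 4))) := rfl

theorem pvGrp_fold (q : List Char) (ws : List String) (p : Nat) (b : Nat) :
    (ws.map (fun w => (w, p))).foldl (pvStepf q) b
      = if pvPf ws q ∧ p < b then p else b := by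
  induction ws generalizing b with
  | nil => simp [pvPf]
  | cons w ws ih =>
    simp only [List.map_cons, List.foldl_cons, ih, pvStepf, pvPf, List.any_cons]
    by_cases hs : PySem.Chars.startswith q w.toList = true <;>
      by_cases hp : p < b <;>
      simp_all [pvPf]
    all_goals (try split_ifs)
    all_goals simp_all

theorem pvStep_eq (q : List Char) (b : Nat) (hb : b ≤ 5) :
    pvKeywords.foldl (pvStepf q) b = min b (pvGp q) := by
  rw [pvKeywords_split]
  simp only [List.foldl_append, pvGrp_fold]
  cases h0 : pvPf pvg0 q <;> cases h1 : pvPf pvg1 q <;> cases h2 : pvPf pvg2 q <;>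
    cases h3 : pvPf pvg3 q <;> cases h4 : pvPf pvg4 q <;>
    simp [pvGp, h0, h1, h2, h3, h4] <;> (try split_ifs) <;> omega

theorem pvIsIn_cons (sub : List Char) (c : Char) (rest : List Char) :
    PySem.Chars.isIn sub (c :: rest)
      = (PySem.Chars.startswith (c :: rest) sub || PySem.Chars.isIn sub rest) := by
  rw [Bool.eq_iff_iff]
  simp only [Bool.or_eq_true, PySem.Chars.isIn_iff_infix, PySem.Chars.startswith_iff]
  exact List.infix_cons_iff

theorem pvOcc_cons (ws : List String) (c : Char) (rest : List Char) :
    pvOcc ws (c :: rest) = (pvPf ws (c :: rest) || pvOcc ws rest) := by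
  induction ws with
  | nil => simp [pvOcc, pvPf]
  | cons w ws ih =>
    simp only [pvOcc, pvPf, List.any_cons] at *
    rw [pvIsIn_cons, ih]
    cases PySem.Chars.startswith (c :: rest) w.toList <;>
      simp [Bool.or_comm, Bool.or_assoc]

theorem pvF_cons (c : Char) (rest : List Char) :
    pvF (c :: rest) = min (pvGp (c :: rest)) (pvF rest) := by
  simp only [pvF, pvGp, pvOcc_cons]
  cases pvPf pvg0 (c :: rest) <;> cases pvPf pvg1 (c :: rest) <;>
    cases pvPf pvg2 (c :: rest) <;> cases pvPf pvg3 (c :: rest) <;>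
    cases pvPf pvg4 (c :: rest) <;>
    cases pvOcc pvg0 rest <;> cases pvOcc pvg1 rest <;> cases pvOcc pvg2 rest <;>
    cases pvOcc pvg3 rest <;> cases pvOcc pvg4 rest <;> simp

theorem pvGp_le (q : List Char) : pvGp q ≤ 5 := by
  unfold pvGp; split_ifs <;> omega

theorem pvF_nil : pvF [] = 5 := by decide

theorem pvScan_eq (q : List Char) : ∀ b, b ≤ 5 → pvScan q b = min b (pvF q) := by
  induction q with
  | nil => intro b hb; simp [pvScan, pvF_nil, Nat.min_eq_left hb]
  | cons c rest ih =>
    intro b hb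
    show pvScan rest (pvKeywords.foldl (pvStepf (c :: rest)) b) = _
    rw [pvStep_eq _ _ hb]
    rw [ih _ (le_trans (Nat.min_le_right _ _) (pvGp_le _))]
    rw [pvF_cons]
    omega

-- ===== VERDICT (by name: the statement is the Claim_ definition above) =====
theorem classify_improvement_py_spec : Claim_equal_classify_improvement_py := by
  intro question _
  unfold Spec_classify_improvement_py
  show classify_improvement_py question = classify_improvement_py_alt question
  have hscan : pvScan (PySem.Str.lower question).toList (pvLabels.length - 1)
      = pvF (PySem.Str.lower question).toList := by
    have h5 : pvLabels.length - 1 = 5 := rfl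
    rw [h5, pvScan_eq _ 5 (by omega)]
    have : pvF (PySem.Str.lower question).toList ≤ 5 := by unfold pvF; split_ifs <;> omega
    omega
  simp only [classify_improvement_py, classify_improvement_py_alt, hscan]
  cases h0 : pvOcc pvg0 (PySem.Str.lower question).toList <;>
  cases h1 : pvOcc pvg1 (PySem.Str.lower question).toList <;>
  cases h2 : pvOcc pvg2 (PySem.Str.lower question).toList <;>
  cases h3 : pvOcc pvg3 (PySem.Str.lower question).toList <;>
  cases h4 : pvOcc pvg4 (PySem.Str.lower question).toList <;>
  simp_all [pvF, pvOcc, pvg0, pvg1, pvg2, pvg3, pvg4, pvLabels]
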